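-- pv_equiv track=rewrite | github.com/w32siooo/aoc_2023_solutions | day09/aoc.py | find_diff_matrix
-- ===== SOURCE A (Python) =====
-- def custom_len(start, stop):
--     return  stop-start
--
-- def find_diff_matrix(ex,result=None):
--     if result is None:
--         result = []
--     diffs=[]
--     for ins in range(len(ex)-1):
--         calculation = custom_len(ex[ins+1],ex[ins])
--         diffs.append(calculation)
--     result.append(diffs)
--     if all(element == 0 for element in diffs):
--         return result
--     else:
--         return find_diff_matrix(diffs,result)
-- ===== SOURCE B (Python) =====
-- def find_diff_matrix(ex, result=None):
--     # Iterative re-implementation: build the rows of successive differences with a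
--     # while loop over zip-pairs, then extend the (possibly caller-supplied) result
--     # list once.  Mutates `result` like the original (extend instead of repeated append).
--     if result is None:
--         result = []
--     rows = []
--     current = ex
--     while True:
--         current = [a - b for a, b in zip(current, current[1:])]
--         rows.append(current)
--         if not any(e != 0 for e in current):
--             break
--     result += rows
--     return result
-- ===== Notes on version B (the rewrite author's own statement) =====
-- stated objective: simpler
-- what changed: Replaces A's index-loop-plus-recursion (threading the result accumulator through recursive calls) by a flat while loop that builds each difference row from zip-pairs, collects the rows in a list, and extends result once at the end.
import Mathlib
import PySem

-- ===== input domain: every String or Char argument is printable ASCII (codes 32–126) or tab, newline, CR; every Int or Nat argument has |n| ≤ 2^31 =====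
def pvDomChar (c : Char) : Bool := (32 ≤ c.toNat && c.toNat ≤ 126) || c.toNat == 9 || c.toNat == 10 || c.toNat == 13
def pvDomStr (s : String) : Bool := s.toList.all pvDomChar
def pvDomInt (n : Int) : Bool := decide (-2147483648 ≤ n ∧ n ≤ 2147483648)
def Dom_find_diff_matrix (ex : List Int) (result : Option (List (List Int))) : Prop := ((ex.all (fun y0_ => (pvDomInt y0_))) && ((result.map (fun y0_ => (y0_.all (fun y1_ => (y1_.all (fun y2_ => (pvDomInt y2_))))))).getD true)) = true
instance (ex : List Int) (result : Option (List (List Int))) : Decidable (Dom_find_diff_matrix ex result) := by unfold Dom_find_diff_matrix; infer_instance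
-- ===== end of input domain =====

-- B replaces A's recursion-with-accumulator by a flat while loop over zip-pairs that
-- collects the rows and extends result once (simpler decomposition).  Both A and B
-- mutate the caller-supplied result list; the equivalence proved is about the return
-- value (B extends once where A appends row by row — the final list contents agree).

-- ===== PORT A =====
def custom_len (start stop : Int) : Int := stop - start

-- the body of A's `for ins in range(len(ex)-1): diffs.append(...)` loop
def pvDiffsA (ex : List Int) : List Int :=
  (PySem.List.pyRange 0 ((ex.length : Int) - 1) 1).foldl
    (fun diffs ins =>
      diffs ++ [custom_len (PySem.List.pyGetD ex (ins + 1) 0) (PySem.List.pyGetD ex ins 0)]) []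

theorem pvDiffsA_eq_map (ex : List Int) :
    pvDiffsA ex = (PySem.List.pyRange 0 ((ex.length : Int) - 1) 1).map
      (fun ins => PySem.List.pyGetD ex ins 0 - PySem.List.pyGetD ex (ins + 1) 0) := by
  rw [pvDiffsA, PySem.List.foldl_append_singleton_eq_map]
  simp [custom_len]

theorem pvDiffsA_length (ex : List Int) : (pvDiffsA ex).length = ex.length - 1 := by
  rw [pvDiffsA_eq_map]
  simp [PySem.List.length_pyRange_one]

def find_diff_matrix (ex : List Int) (result : Option (List (List Int))) : List (List Int) :=
  let result0 := result.getD []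
  let diffs := pvDiffsA ex
  let result1 := result0 ++ [diffs]
  if h : diffs.all (fun element => element == 0) then result1
  else find_diff_matrix diffs (some result1)
termination_by ex.length
decreasing_by
  have hlen := pvDiffsA_length ex
  have hne : pvDiffsA ex ≠ [] := by
    intro hnil
    apply h
    show (pvDiffsA ex).all _ = true
    rw [hnil]; rfl
  have : 0 < (pvDiffsA ex).length := List.length_pos_of_ne_nil hne
  omega

-- ===== PORT B =====
def altDiff (current : List Int) : List Int :=
  (current.zip (current.drop 1)).map (fun p => p.1 - p.2)

theorem altDiff_length (current : List Int) :
    (altDiff current).length = current.length - 1 := by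
  simp [altDiff]

def altRows (current : List Int) : List (List Int) :=
  let d := altDiff current
  if h : d.any (fun e => e != 0) then d :: altRows d else [d]
termination_by current.length
decreasing_by
  have hlen := altDiff_length current
  have hne : altDiff current ≠ [] := by
    intro hnil
    have h' : ((altDiff current).any (fun e => e != 0)) = true := h
    rw [hnil] at h'; simp at h'
  have : 0 < (altDiff current).length := List.length_pos_of_ne_nil hne
  omega

def find_diff_matrix_alt (ex : List Int) (result : Option (List (List Int))) : List (List Int) :=
  result.getD [] ++ altRows ex

-- ===== PRECONDITION & SPEC =====
def Spec_find_diff_matrix (ex : List Int) (result : Option (List (List Int))) (out : List (List Int)) : Prop := out = find_diff_matrix_alt ex result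
instance (ex : List Int) (result : Option (List (List Int))) (out : List (List Int)) : Decidable (Spec_find_diff_matrix ex result out) := by unfold Spec_find_diff_matrix; infer_instance

-- ===== CLAIM (what is proved, stated in full; the proofs are below) =====
def Claim_equal_find_diff_matrix : Prop := ∀ (ex : List Int) (result : Option (List (List Int))), Dom_find_diff_matrix ex result → Spec_find_diff_matrix ex result (find_diff_matrix ex result)

-- ===== LEMMAS AND PROOFS =====

-- the two difference rows coincide
theorem pvDiffsA_eq_altDiff (ex : List Int) : pvDiffsA ex = altDiff ex := by
  apply List.ext_getElem
  · rw [pvDiffsA_length, altDiff_length]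
  · intro k h1 h2
    rw [pvDiffsA_length] at h1
    rw [List.getElem_of_eq (pvDiffsA_eq_map ex)]
    simp only [List.getElem_map, PySem.List.getElem_pyRange_one, altDiff, List.getElem_zip]
    rw [PySem.List.pyGetD_eq_getElem ex (i := 0 + (k : Int)) 0 (by omega) (by push_cast; omega),
        PySem.List.pyGetD_eq_getElem ex (i := 0 + (k : Int) + 1) 0 (by omega) (by push_cast; omega)]
    simp

theorem all_iff_not_any (d : List Int) :
    (d.all (fun element => element == 0)) = !(d.any (fun e => e != 0)) := by
  induction d with
  | nil => rfl
  | cons x t ih => simp_all [bne, Bool.not_not]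

theorem find_eq_alt (n : Nat) : ∀ (ex : List Int) (result : Option (List (List Int))),
    ex.length ≤ n → find_diff_matrix ex result = result.getD [] ++ altRows ex := by
  induction n with
  | zero =>
    intro ex result hlen
    have hex : ex = [] := by
      cases ex with
      | nil => rfl
      | cons a t => simp at hlen
    subst hex
    rw [find_diff_matrix, altRows]
    simp [pvDiffsA, altDiff, PySem.List.pyRange_one_eq_nil]
  | succ m ih =>
    intro ex result hlen
    rw [find_diff_matrix, altRows]
    simp only [pvDiffsA_eq_altDiff, all_iff_not_any]
    by_cases h : (altDiff ex).any (fun e => e != 0)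
    · simp only [h]
      have hne : altDiff ex ≠ [] := by
        intro hnil; rw [hnil] at h; simp at h
      have hlt : (altDiff ex).length ≤ m := by
        have := altDiff_length ex
        have := List.length_pos_of_ne_nil hne
        omega
      rw [ih _ _ hlt]
      simp
    · simp only [h]
      simp

-- ===== VERDICT (by name: the statement is the Claim_ definition above) =====
theorem find_diff_matrix_spec : Claim_equal_find_diff_matrix := by
  intro ex result _
  unfold Spec_find_diff_matrix find_diff_matrix_alt
  exact find_eq_alt ex.length ex result le_rfl
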